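-- pv_equiv track=rewrite | github.com/ushakov/remsearch | desktop/ioutils.py | Int16ToStr
-- ===== SOURCE A (Python) =====
-- def Int16ToStr(num):
--   assert num >= 0
--   assert num < 2**16
--   result = ''
--   for _ in range(2):
--     char = chr(num & 255)
--     result = char + result
--     num >>= 8
--   return result
-- ===== SOURCE B (Python) =====
-- def Int16ToStr(num):
--   assert num >= 0
--   assert num < 2**16
--   return chr(num >> 8) + chr(num & 255)
-- ===== Notes on version B (the rewrite author's own statement) =====
-- stated objective: simpler
-- what changed: Replaces the 2-iteration byte-extraction loop with mutable result/num state by a single closed-form expression chr(num >> 8) + chr(num & 255).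
import Mathlib
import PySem

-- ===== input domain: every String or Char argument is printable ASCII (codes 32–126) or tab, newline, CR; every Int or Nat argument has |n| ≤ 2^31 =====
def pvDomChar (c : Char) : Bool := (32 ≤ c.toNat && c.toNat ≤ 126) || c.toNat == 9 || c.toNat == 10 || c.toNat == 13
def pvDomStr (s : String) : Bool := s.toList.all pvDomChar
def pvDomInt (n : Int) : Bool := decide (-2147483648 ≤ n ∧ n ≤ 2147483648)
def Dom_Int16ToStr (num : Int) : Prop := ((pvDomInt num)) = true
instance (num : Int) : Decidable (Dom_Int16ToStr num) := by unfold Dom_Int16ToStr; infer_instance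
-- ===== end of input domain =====

-- B replaces A's 2-iteration byte-extraction loop by one closed-form expression (objective: simpler).

-- ===== PORT A =====
-- Python's `num & 255` equals Python `num % 256` (= PySem.Int.mod num 256) for every int,
-- and `num >> 8` equals Python `num // 256` (= PySem.Int.floordiv num 256); ported so.
def Int16ToStr (num : Int) : String :=
  let st := (PySem.List.pyRange 0 2 1).foldl
    (fun (s : List Char × Int) _ =>
      let char := Char.ofNat (PySem.Int.mod s.2 256).toNat
      ([char] ++ s.1, PySem.Int.floordiv s.2 256))
    ([], num)
  String.mk st.1

-- ===== PORT B =====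
def Int16ToStr_alt (num : Int) : String :=
  String.mk [Char.ofNat (PySem.Int.floordiv num 256).toNat,
             Char.ofNat (PySem.Int.mod num 256).toNat]

-- ===== PRECONDITION & SPEC =====
-- A asserts 0 <= num < 2**16 (AssertionError otherwise); exactly those inputs are admitted.
def Pre_Int16ToStr (num : Int) : Prop := 0 ≤ num ∧ num < 65536
instance (num : Int) : Decidable (Pre_Int16ToStr num) := by unfold Pre_Int16ToStr; infer_instance
def pvWitness_Int16ToStr : Int := (513)

def Spec_Int16ToStr (num : Int) (out : String) : Prop := out = Int16ToStr_alt num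
instance (num : Int) (out : String) : Decidable (Spec_Int16ToStr num out) := by unfold Spec_Int16ToStr; infer_instance

-- ===== CLAIM (what is proved, stated in full; the proofs are below) =====
def Claim_equal_Int16ToStr : Prop := ∀ (num : Int), Dom_Int16ToStr num → Pre_Int16ToStr num → Spec_Int16ToStr num (Int16ToStr num)

-- ===== LEMMAS AND PROOFS =====

-- ===== VERDICT (by name: the statement is the Claim_ definition above) =====
theorem Int16ToStr_spec : Claim_equal_Int16ToStr := by
  intro num _ hpre
  obtain ⟨h0, h1⟩ := hpre
  show Int16ToStr num = Int16ToStr_alt num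
  unfold Int16ToStr Int16ToStr_alt
  have hr : PySem.List.pyRange 0 2 1 = [0, 1] := by decide
  rw [hr]
  simp only [List.foldl]
  have h2 : PySem.Int.mod (PySem.Int.floordiv num 256) 256 = PySem.Int.floordiv num 256 := by
    rw [PySem.Int.floordiv_eq_ediv_of_pos (by omega),
        PySem.Int.mod_eq_emod_of_pos (by omega)]
    omega
  simp [h2]
  have h3 : num / 256 % 256 = num / 256 := by omega
  rw [h3]
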